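-- pv_equiv track=rewrite | github.com/nodusrf/nodus-edge | src/nodus_edge/hallucination_filter.py | _truncate_comma_loop
-- ===== SOURCE A (Python) =====
-- from typing import Optional, Set, Tuple, TYPE_CHECKING
--
-- def _truncate_comma_loop(text: str) -> Tuple[str, bool]:
--     """Truncate comma-separated tail loops.
--
--     Catches patterns like "Real speech, W0F, W0F, W0F, W0F" where
--     Whisper starts with valid content then loops on a comma-separated token.
--     """
--     tokens = [t.strip() for t in text.split(",") if t.strip()]
--     if len(tokens) < 4:
--         return text, False
--
--     normalized = [t.rstrip(".!?,;:").strip().lower() for t in tokens]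
--
--     run_start = None
--     run_count = 1
--     for i in range(1, len(normalized)):
--         if normalized[i] == normalized[i - 1] and normalized[i]:
--             run_count += 1
--             if run_count >= 3 and run_start is None:
--                 run_start = i - run_count + 1
--                 break
--         else:
--             run_count = 1
--
--     if run_start is None:
--         return text, False
--
--     # Keep everything up to and including the first instance of the repeat
--     kept = tokens[:run_start + 1]
--     return ", ".join(kept), True
-- ===== SOURCE B (Python) =====
-- def _rle(xs):
--     """Run-length encode xs into (value, count) pairs, recursively."""
--     if not xs:
--         return []
--     head = xs[0]
--     n = 1
--     while n < len(xs) and xs[n] == head: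
--         n += 1
--     return [(head, n)] + _rle(xs[n:])
--
--
-- def _truncate_comma_loop(text):
--     """Truncate comma-separated tail loops (groupby-style: run-length encode, then scan groups)."""
--     tokens = [t.strip() for t in text.split(",") if t.strip()]
--     if len(tokens) < 4:
--         return text, False
--
--     normalized = [t.rstrip(".!?,;:").strip().lower() for t in tokens]
--
--     groups = _rle(normalized)
--     idx = 0
--     for key, length in groups:
--         if key and length >= 3:
--             return ", ".join(tokens[: idx + 1]), True
--         idx += length
--     return text, False
-- ===== Notes on version B (the rewrite author's own statement) =====
-- stated objective: alternative
-- what changed: Replaces A's stateful run-counter scan by two staged passes: recursively run-length encode the normalized tokens into (value, count) groups, then scan the groups for the first non-empty run of length >= 3 and truncate at its start.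
import Mathlib
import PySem

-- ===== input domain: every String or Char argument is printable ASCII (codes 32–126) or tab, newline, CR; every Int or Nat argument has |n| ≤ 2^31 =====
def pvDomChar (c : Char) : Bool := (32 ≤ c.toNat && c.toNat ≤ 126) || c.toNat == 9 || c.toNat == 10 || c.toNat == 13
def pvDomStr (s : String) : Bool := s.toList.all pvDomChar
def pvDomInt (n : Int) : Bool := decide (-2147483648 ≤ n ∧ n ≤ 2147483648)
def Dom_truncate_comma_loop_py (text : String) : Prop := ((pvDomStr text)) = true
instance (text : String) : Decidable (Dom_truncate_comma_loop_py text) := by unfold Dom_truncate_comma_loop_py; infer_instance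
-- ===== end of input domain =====

-- B replaces A's stateful run-counter scan by two staged passes (run-length encode, then scan
-- the groups for the first non-empty run of length >= 3); objective: alternative decomposition.

-- shared preamble of both Pythons (identical code in A and B):
-- t.rstrip(".!?,;:") ported by hand: drop the longest trailing run of chars from the set (exact)
def pvRstripPunct (t : String) : String :=
  String.ofList ((t.toList.reverse.dropWhile (fun c => c ∈ ['.', '!', '?', ',', ';', ':'])).reverse)

-- [t.strip() for t in text.split(",") if t.strip()]
def pvTokens (text : String) : List String :=
  ((PySem.Chars.splitOn text.toList [',']).map (fun t => String.ofList (PySem.Chars.strip t))).filter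
    (fun t => t ≠ "")

-- t.rstrip(".!?,;:").strip().lower()
def pvNormTok (t : String) : String :=
  PySem.Str.lower (PySem.Str.strip (pvRstripPunct t))

-- ===== PORT A =====
-- the for-loop over range(1, len(normalized)) with run_count state; the break is the `some` return
def pvLoopA (norm : List String) (i : Nat) (runCount : Nat) : Option Nat :=
  if _h : i < norm.length then
    if norm[i]! = norm[i-1]! ∧ norm[i]! ≠ "" then
      -- run_count += 1; if run_count >= 3 (run_start still None): set run_start and break
      if 3 ≤ runCount + 1 then some (i + 1 - (runCount + 1))
      else pvLoopA norm (i+1) (runCount + 1)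
    else pvLoopA norm (i+1) 1
  else none
termination_by norm.length - i

def truncate_comma_loop_py (text : String) : String × Bool :=
  let tokens := pvTokens text
  if tokens.length < 4 then (text, false)
  else
    let normalized := tokens.map pvNormTok
    match pvLoopA normalized 1 1 with
    | none => (text, false)
    | some runStart => (PySem.Str.join ", " (tokens.take (runStart + 1)), true)

-- ===== PORT B =====
-- _rle(xs): the inner `while` counts the equal prefix (1 + takeWhile length, exact), then recurse on xs[n:]
def pvRLE : List String → List (String × Nat)
  | [] => []
  | x :: xs =>
    let k := (xs.takeWhile (fun t => t = x)).length
    (x, 1 + k) :: pvRLE (xs.drop k)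
termination_by l => l.length
decreasing_by simp only [List.length_drop, List.length_cons]; omega

-- the `for key, length in groups` loop with the running `idx` accumulator
def pvFindGroup : List (String × Nat) → Nat → Option Nat
  | [], _ => none
  | (key, len) :: gs, idx =>
      if key ≠ "" ∧ 3 ≤ len then some idx else pvFindGroup gs (idx + len)

def truncate_comma_loop_py_alt (text : String) : String × Bool :=
  let tokens := pvTokens text
  if tokens.length < 4 then (text, false)
  else
    match pvFindGroup (pvRLE (tokens.map pvNormTok)) 0 with
    | none => (text, false)
    | some idx => (PySem.Str.join ", " (tokens.take (idx + 1)), true)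

-- ===== PRECONDITION & SPEC =====
def Spec_truncate_comma_loop_py (text : String) (out : String × Bool) : Prop := out = truncate_comma_loop_py_alt text
instance (text : String) (out : String × Bool) : Decidable (Spec_truncate_comma_loop_py text out) := by unfold Spec_truncate_comma_loop_py; infer_instance

-- ===== CLAIM (what is proved, stated in full; the proofs are below) =====
def Claim_equal_truncate_comma_loop_py : Prop := ∀ (text : String), Dom_truncate_comma_loop_py text → Spec_truncate_comma_loop_py text (truncate_comma_loop_py text)

-- ===== LEMMAS AND PROOFS =====

-- proof-only intermediate: first index whose 3-window is one repeated non-empty token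
def pvFirstTriple : List String → Nat → Option Nat
  | a :: b :: c :: rest, j =>
      if a ≠ "" ∧ a = b ∧ b = c then some j else pvFirstTriple (b :: c :: rest) (j+1)
  | _, _ => none

lemma pvFirstTriple_short (l : List String) (j : Nat) (h : l.length < 3) :
    pvFirstTriple l j = none := by
  match l with
  | [] => rfl
  | [_] => rfl
  | [_, _] => rfl
  | _ :: _ :: _ :: _ => simp at h; omega

lemma pvKey (norm : List String) :
    ∀ k i, norm.length - i ≤ k → 1 ≤ i → i ≤ norm.length →
      (pvLoopA norm i 1 = pvFirstTriple (norm.drop (i-1)) (i-1)) ∧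
      (2 ≤ i → norm[i-1]! = norm[i-2]! → norm[i-1]! ≠ "" →
        pvLoopA norm i 2 = pvFirstTriple (norm.drop (i-2)) (i-2)) := by
  intro k
  induction k with
  | zero =>
    intro i hk h1 h2
    have hin : ¬ i < norm.length := by omega
    refine ⟨?_, fun h2i _ _ => ?_⟩
    · rw [pvLoopA, dif_neg hin]
      exact (pvFirstTriple_short _ _ (by rw [List.length_drop]; omega)).symm
    · rw [pvLoopA, dif_neg hin]
      exact (pvFirstTriple_short _ _ (by rw [List.length_drop]; omega)).symm
  | succ k ih =>
    intro i hk h1 h2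
    by_cases hi : i < norm.length
    case neg =>
      refine ⟨?_, fun h2i _ _ => ?_⟩
      · rw [pvLoopA, dif_neg hi]
        exact (pvFirstTriple_short _ _ (by rw [List.length_drop]; omega)).symm
      · rw [pvLoopA, dif_neg hi]
        exact (pvFirstTriple_short _ _ (by rw [List.length_drop]; omega)).symm
    case pos =>
      have hi1 : i - 1 < norm.length := by omega
      have gi : norm[i]! = norm[i] := getElem!_pos norm i hi
      have gi1 : norm[i-1]! = norm[i-1] := getElem!_pos norm (i-1) hi1
      have hd1 : norm.drop (i-1) = norm[i-1] :: norm.drop i := by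
        rw [List.drop_eq_getElem_cons hi1, show i-1+1 = i by omega]
      have hdi : norm.drop i = norm[i] :: norm.drop (i+1) :=
        List.drop_eq_getElem_cons hi
      by_cases hc : norm[i]! = norm[i-1]! ∧ norm[i]! ≠ ""
      case pos =>
        constructor
        · -- rc := 1+1 = 2 < 3: recurse; by IH.2 at i+1 the run invariant now holds
          rw [pvLoopA, dif_pos hi, if_pos hc, if_neg (by omega)]
          have := (ih (i+1) (by omega) (by omega) (by omega)).2 (by omega)
            (by rw [show i+1-1 = i from rfl, show i+1-2 = i-1 by omega]; exact hc.1)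
            (by rw [show i+1-1 = i from rfl]; exact hc.2)
          rwa [show i+1-2 = i-1 by omega] at this
        · -- rc := 2+1 = 3: return some (i+1-3); a window of 3 starts at i-2
          intro h2i hpair hne
          rw [pvLoopA, dif_pos hi, if_pos hc, if_pos (by omega)]
          have hi2 : i - 2 < norm.length := by omega
          have hd2 : norm.drop (i-2) = norm[i-2] :: norm.drop (i-1) := by
            rw [List.drop_eq_getElem_cons hi2, show i-2+1 = i-1 by omega]
          rw [hd2, hd1, hdi, pvFirstTriple]
          have gi2 : norm[i-2]! = norm[i-2] := getElem!_pos norm (i-2) hi2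
          rw [gi1, gi2] at hpair
          rw [gi1] at hne
          rw [gi, gi1] at hc
          rw [if_pos ⟨by rw [← hpair]; exact hne, hpair.symm, hc.1.symm⟩, show i+1-(2+1) = i-2 by omega]
      case neg =>
        have hnext := (ih (i+1) (by omega) (by omega) (by omega)).1
        rw [show i+1-1 = i from rfl] at hnext
        have hc' := hc
        rw [gi, gi1] at hc'
        -- the failed pair (i-1, i) means no window can start at i-1
        have hskip : pvFirstTriple (norm.drop (i-1)) (i-1) = pvFirstTriple (norm.drop i) i := by
          rw [hd1, hdi]
          cases hrest : norm.drop (i+1) with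
          | nil =>
            rw [pvFirstTriple_short _ _ (by simp), pvFirstTriple_short _ _ (by simp)]
          | cons c rest =>
            rw [pvFirstTriple]
            have hcond : ¬ (norm[i-1] ≠ "" ∧ norm[i-1] = norm[i] ∧ norm[i] = c) := by
              rintro ⟨hne, hab, _⟩
              exact hc' ⟨hab.symm, by rw [← hab]; exact hne⟩
            rw [if_neg hcond, show i-1+1 = i by omega]
        refine ⟨?_, fun h2i hpair hne => ?_⟩
        · rw [pvLoopA, dif_pos hi, if_neg hc, hnext, hskip]
        · -- and under the run invariant no window starts at i-2 either
          have hi2 : i - 2 < norm.length := by omega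
          have hd2 : norm.drop (i-2) = norm[i-2] :: norm.drop (i-1) := by
            rw [List.drop_eq_getElem_cons hi2, show i-2+1 = i-1 by omega]
          have gi2 : norm[i-2]! = norm[i-2] := getElem!_pos norm (i-2) hi2
          rw [gi1, gi2] at hpair
          rw [gi1] at hne
          have hskip2 : pvFirstTriple (norm.drop (i-2)) (i-2) = pvFirstTriple (norm.drop (i-1)) (i-1) := by
            rw [hd2, hd1, hdi, pvFirstTriple]
            have hcond : ¬ (norm[i-2] ≠ "" ∧ norm[i-2] = norm[i-1] ∧ norm[i-1] = norm[i]) := by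
              rintro ⟨_, _, hbc⟩
              exact hc' ⟨hbc.symm, by rw [← hbc]; exact hne⟩
            rw [if_neg hcond, ← hdi, ← hd1, show i-2+1 = i-1 by omega]
          rw [pvLoopA, dif_pos hi, if_neg hc, hnext, hskip2, hskip]

-- stepping past one element that differs from the next (no window can start at it)
lemma pvTriple_step_ne (x b : String) (xs : List String) (j : Nat) (h : x ≠ b) :
    pvFirstTriple (x :: b :: xs) j = pvFirstTriple (b :: xs) (j+1) := by
  cases xs with
  | nil => rfl
  | cons c rest =>
    rw [pvFirstTriple]
    exact if_neg (by rintro ⟨_, hab, _⟩; exact h hab)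

-- stepping past one empty token (empty tokens never start a window)
lemma pvTriple_step_empty (xs : List String) (j : Nat) :
    pvFirstTriple ("" :: xs) j = pvFirstTriple xs (j+1) := by
  cases xs with
  | nil => rfl
  | cons b ys =>
    cases ys with
    | nil => rfl
    | cons c rest =>
      rw [pvFirstTriple]
      exact if_neg (by rintro ⟨hne, _, _⟩; exact hne rfl)

-- skipping a whole run of empty tokens
lemma pvTriple_skip_empties (xs : List String) (j : Nat) :
    pvFirstTriple ("" :: xs) j =
      pvFirstTriple (xs.drop ((xs.takeWhile (fun t => t = ("" : String))).length))
        (j + 1 + (xs.takeWhile (fun t => t = ("" : String))).length) := by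
  induction xs generalizing j with
  | nil => simp [pvTriple_step_empty]
  | cons y ys ih =>
    by_cases hy : y = ("" : String)
    · subst hy
      rw [pvTriple_step_empty, List.takeWhile_cons_of_pos (by simp), List.length_cons,
        List.drop_succ_cons]
      have h := ih (j+1)
      convert h using 2
      omega
    · rw [pvTriple_step_empty]
      rw [List.takeWhile_cons, if_neg (by simpa using hy)]
      simp

-- the first non-empty run of length ≥ 3 is exactly the first repeated 3-window
lemma pvTriple_eq_findGroup_aux :
    ∀ (n : Nat) (l : List String), l.length ≤ n → ∀ j, pvFirstTriple l j = pvFindGroup (pvRLE l) j := by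
  intro n
  induction n with
  | zero =>
    intro l hl j
    match l, hl with
    | [], _ => simp [pvFirstTriple, pvRLE, pvFindGroup]
  | succ n ih =>
    intro l hl j
    cases l with
    | nil => simp [pvFirstTriple, pvRLE, pvFindGroup]
    | cons x xs =>
      rw [pvRLE]
      set k := (xs.takeWhile (fun t => t = x)).length with hk
      rw [pvFindGroup]
      by_cases hc : x ≠ "" ∧ 3 ≤ 1 + k
      · -- the run at the front fires: l starts with x, x, x
        rw [if_pos hc]
        have hk2 : 2 ≤ k := by omega
        cases xs with
        | nil => rw [hk] at hk2; simp at hk2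
        | cons a ys =>
          have ha : a = x := by
            by_contra h
            rw [hk, List.takeWhile_cons_of_neg (by simpa using h)] at hk2; simp at hk2
          subst ha
          cases ys with
          | nil =>
            rw [hk, List.takeWhile_cons_of_pos (by simp)] at hk2; simp at hk2
          | cons b t =>
            have hb : b = a := by
              by_contra h
              rw [hk, List.takeWhile_cons_of_pos (by simp),
                List.takeWhile_cons_of_neg (by simpa using h)] at hk2
              simp at hk2
            subst hb
            rw [pvFirstTriple, if_pos ⟨hc.1, rfl, rfl⟩]
      · -- the run does not fire: skip the whole run and recurse
        rw [if_neg hc]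
        have hrec : ∀ j', pvFirstTriple (xs.drop k) j' = pvFindGroup (pvRLE (xs.drop k)) j' := by
          intro j'
          refine ih (xs.drop k) ?_ j'
          simp only [List.length_cons] at hl
          simp only [List.length_drop]
          omega
        rw [← hrec]
        by_cases hx : x = ""
        · subst hx
          have h := pvTriple_skip_empties xs j
          rw [← hk] at h
          rw [h]
          congr 1
          omega
        · have hk1 : k ≤ 1 := by by_contra h; exact hc ⟨hx, by omega⟩
          cases xs with
          | nil =>
            simp [pvFirstTriple, List.drop_nil]
          | cons b ys =>
            by_cases hb : b = x
            · subst hb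
              -- k = 1 and the run is b, b followed by a different token (or nothing)
              have hk1' : k = (ys.takeWhile (fun t => t = b)).length + 1 := by
                rw [hk, List.takeWhile_cons_of_pos (by simp), List.length_cons]
              have hys0 : (ys.takeWhile (fun t => t = b)).length = 0 := by omega
              have hkeq : k = 1 := by omega
              rw [hkeq]
              cases ys with
              | nil => simp [pvFirstTriple]
              | cons c t =>
                have hcx : c ≠ b := by
                  intro h
                  rw [List.takeWhile_cons_of_pos (by simpa using h)] at hys0; simp at hys0
                rw [pvFirstTriple, if_neg (by rintro ⟨_, _, hbc⟩; exact hcx hbc.symm)]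
                simp only [List.drop_succ_cons, List.drop_zero]
                rw [pvTriple_step_ne b c t (j+1) (fun h => hcx h.symm)]
            · -- k = 0: x differs from the next token
              have hkeq : k = 0 := by
                rw [hk, List.takeWhile_cons_of_neg (by simpa using hb)]; rfl
              rw [hkeq]
              simp only [List.drop_zero]
              rw [pvTriple_step_ne x b ys j (fun h => hb h.symm)]

lemma pvTriple_eq_findGroup (l : List String) (j : Nat) :
    pvFirstTriple l j = pvFindGroup (pvRLE l) j :=
  pvTriple_eq_findGroup_aux l.length l le_rfl j

-- ===== VERDICT (by name: the statement is the Claim_ definition above) =====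
theorem truncate_comma_loop_py_spec : Claim_equal_truncate_comma_loop_py := by
  intro text _
  unfold Spec_truncate_comma_loop_py truncate_comma_loop_py truncate_comma_loop_py_alt
  by_cases hlen : (pvTokens text).length < 4
  · simp [hlen]
  · simp only [hlen, if_false]
    have hlen' : 1 ≤ ((pvTokens text).map pvNormTok).length := by
      simp; omega
    have h1 := (pvKey ((pvTokens text).map pvNormTok)
      (((pvTokens text).map pvNormTok).length - 1) 1 (by omega) (by omega) hlen').1
    simp only [Nat.sub_self, List.drop_zero] at h1
    rw [h1, pvTriple_eq_findGroup]
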